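-- pv_equiv track=rewrite | github.com/lMoonHawk/AoC-py | 2023/day_04.py | list_combin
-- ===== SOURCE A (Python) =====
-- def list_combin(a: list, b: list) -> list:
--     """Elementwise list addition preserving the longest"""
--     diff = len(a) - len(b)
--     out = [a_i + b_i for a_i, b_i in zip(a, b)]
--     if diff > 0:
--         out.extend(a[-diff:])
--     if diff < 0:
--         out.extend(b[diff:])
--     return out
-- ===== SOURCE B (Python) =====
-- def list_combin(a: list, b: list) -> list:
--     """Elementwise list addition preserving the longest: copy the longer
--     list and fold the shorter one into its prefix in place."""
--     if len(a) >= len(b):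
--         out = list(a)
--         for i, y in enumerate(b):
--             out[i] = out[i] + y
--     else:
--         out = list(b)
--         for i, x in enumerate(a):
--             out[i] = x + out[i]
--     return out
-- ===== Notes on version B (the rewrite author's own statement) =====
-- stated objective: alternative
-- what changed: Instead of a zip comprehension followed by a negative-slice extend, B copies the longer list once and folds the shorter list into its prefix with a single in-place index loop, preserving the a_i + b_i operand order.
import Mathlib
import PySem

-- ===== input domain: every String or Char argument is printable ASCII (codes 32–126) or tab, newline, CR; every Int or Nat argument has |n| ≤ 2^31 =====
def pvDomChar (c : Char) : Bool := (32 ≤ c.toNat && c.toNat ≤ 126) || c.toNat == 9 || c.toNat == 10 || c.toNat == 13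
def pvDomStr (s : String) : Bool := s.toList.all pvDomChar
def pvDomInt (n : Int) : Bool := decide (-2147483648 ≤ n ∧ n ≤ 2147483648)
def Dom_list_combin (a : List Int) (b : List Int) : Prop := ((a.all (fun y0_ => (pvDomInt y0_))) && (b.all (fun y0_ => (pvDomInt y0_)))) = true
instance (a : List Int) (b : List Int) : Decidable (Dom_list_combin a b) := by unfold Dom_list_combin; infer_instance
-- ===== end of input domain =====

-- B replaces A's zip-comprehension + negative-slice extend by copying the longer list and folding the shorter one into its prefix in place (objective: alternative).
-- ===== PORT A =====
def list_combin (a : List Int) (b : List Int) : List Int :=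
  let diff : Int := (a.length : Int) - (b.length : Int)
  let out : List Int := (a.zip b).map (fun p => p.1 + p.2)
  if diff > 0 then out ++ PySem.List.slice a (some (-diff)) none
  else if diff < 0 then out ++ PySem.List.slice b (some diff) none
  else out

-- ===== PORT B =====
def list_combin_alt (a : List Int) (b : List Int) : List Int :=
  -- the enumerate indices are ≥ 0, so `.toNat` is exact here
  if a.length ≥ b.length then
    (PySem.List.enumerate b 0).foldl
      (fun out p => out.set p.1.toNat (out.getD p.1.toNat 0 + p.2)) a
  else
    (PySem.List.enumerate a 0).foldl
      (fun out p => out.set p.1.toNat (p.2 + out.getD p.1.toNat 0)) b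

-- ===== PRECONDITION & SPEC =====
def Spec_list_combin (a : List Int) (b : List Int) (out : List Int) : Prop := out = list_combin_alt a b
instance (a : List Int) (b : List Int) (out : List Int) : Decidable (Spec_list_combin a b out) := by unfold Spec_list_combin; infer_instance

-- ===== CLAIM (what is proved, stated in full; the proofs are below) =====
def Claim_equal_list_combin : Prop := ∀ (a : List Int) (b : List Int), Dom_list_combin a b → Spec_list_combin a b (list_combin a b)

-- ===== LEMMAS AND PROOFS =====

lemma getD_append_len (pre out : List Int) (d : Int) :
    (pre ++ out).getD pre.length d = out.getD 0 d := by
  induction pre with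
  | nil => rfl
  | cons x xs ih => simpa using ih

lemma set_append_len (pre out : List Int) (v : Int) :
    (pre ++ out).set pre.length v = pre ++ out.set 0 v := by
  induction pre with
  | nil => rfl
  | cons x xs ih => simp [ih]

lemma foldl_set_enum (f : Int → Int → Int) :
    ∀ (c pre out : List Int), c.length ≤ out.length →
      (PySem.List.enumerate c (pre.length : Int)).foldl
        (fun o p => o.set p.1.toNat (f (o.getD p.1.toNat 0) p.2)) (pre ++ out)
      = pre ++ (List.zipWith f out c ++ out.drop c.length) := by
  intro c
  induction c with
  | nil => intro pre out _; simp [PySem.List.enumerate_nil]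
  | cons y ys ih =>
      intro pre out hlen
      match out with
      | [] => simp at hlen
      | z :: zs =>
        rw [PySem.List.enumerate_cons]
        simp only [List.foldl_cons]
        have h1 : ((pre.length : Int)).toNat = pre.length := by omega
        rw [h1, getD_append_len, set_append_len]
        have h2 : pre ++ (z :: zs).set 0 (f ((z :: zs).getD 0 0) y)
            = (pre ++ [f z y]) ++ zs := by simp [List.getD]
        have h3 : (pre.length : Int) + 1 = ((pre ++ [f z y]).length : Int) := by
          simp
        rw [h2, h3, ih (pre ++ [f z y]) zs (by simpa using Nat.le_of_succ_le_succ hlen)]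
        simp

lemma alt_closed (a b : List Int) :
    list_combin_alt a b = List.zipWith (· + ·) a b ++ a.drop b.length ++ b.drop a.length := by
  unfold list_combin_alt
  split_ifs with h
  · have := foldl_set_enum (· + ·) b ([] : List Int) a (by simpa using h)
    simp only [List.length_nil, Nat.cast_zero, List.nil_append] at this
    rw [this]
    have : b.drop a.length = [] := List.drop_eq_nil_of_le (by omega)
    simp [this]
  · have := foldl_set_enum (fun u v => v + u) a ([] : List Int) b (by omega)
    simp only [List.length_nil, Nat.cast_zero, List.nil_append] at this
    rw [this]
    have h1 : List.zipWith (fun u v => v + u) b a = List.zipWith (· + ·) a b :=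
      (List.zipWith_comm (f := (· + ·)) (as := a) (bs := b)).symm
    have h2 : a.drop b.length = [] := List.drop_eq_nil_of_le (by omega)
    rw [h1, h2]
    simp

lemma a_closed (a b : List Int) :
    list_combin a b = List.zipWith (· + ·) a b ++ a.drop b.length ++ b.drop a.length := by
  unfold list_combin
  have hzip : (a.zip b).map (fun p => p.1 + p.2) = List.zipWith (· + ·) a b := by
    simp [List.zip_eq_zipWith]
  dsimp only
  split_ifs with h1 h2
  · -- a longer
    have hk : 0 < a.length - b.length := by omega
    have hcast : -((a.length : Int) - (b.length : Int)) = -((a.length - b.length : Nat) : Int) := by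
      omega
    rw [hzip, hcast, PySem.List.slice_from_neg_natCast a _ hk]
    have h1 : a.length - (a.length - b.length) = b.length := by omega
    have h2 : b.drop a.length = [] := List.drop_eq_nil_of_le (by omega)
    rw [h1, h2, List.append_nil]
  · -- b longer
    have hk : 0 < b.length - a.length := by
      omega
    have hcast : (a.length : Int) - (b.length : Int) = -((b.length - a.length : Nat) : Int) := by
      omega
    rw [hzip, hcast, PySem.List.slice_from_neg_natCast b _ hk]
    have hd : a.drop b.length = [] := List.drop_eq_nil_of_le (by omega)
    have h1 : b.length - (b.length - a.length) = a.length := by omega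
    rw [hd, h1, List.append_nil]
  · -- equal lengths
    have hlen : a.length = b.length := by omega
    have hd1 : a.drop b.length = [] := List.drop_eq_nil_of_le (by omega)
    have hd2 : b.drop a.length = [] := List.drop_eq_nil_of_le (by omega)
    rw [hzip, hd1, hd2, List.append_nil, List.append_nil]

theorem list_combin_spec : Claim_equal_list_combin := by
  intro a b _
  unfold Spec_list_combin
  rw [a_closed, alt_closed]
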